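-- pv_equiv track=rewrite | github.com/Howyi888/btp2-network-monitor | btp2/monitor.py | merge_status
-- ===== SOURCE A (Python) =====
-- from typing import Any, Dict, List, Optional, Tuple, TypeVar, Union
--
-- T = TypeVar('T')
--
-- def merge_status(status: Dict[Tuple[str,str],T]) -> Dict[Tuple[str,str],List[T]]:
--     new_status: Dict[Tuple[str,str],List[T]] = {}
--     for conn, value in status.items():
--         reverse = conn[0] > conn[1]
--         key = conn if not reverse else (conn[1], conn[0])
--         if key not in new_status:
--             new_status[key] = [ None, None ]
--         sl = new_status[key]
--         sl[reverse] = value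
--     return new_status
-- ===== SOURCE B (Python) =====
-- def merge_status(status):
--     keys = dict.fromkeys(tuple(sorted(conn)) for conn in status)
--     return {key: [status.get(key),
--                   None if key[0] == key[1] else status.get((key[1], key[0]))]
--             for key in keys}
-- ===== Notes on version B (the rewrite author's own statement) =====
-- stated objective: alternative
-- what changed: Replaces A's single-pass scatter into mutable two-slot lists (create-on-miss, then assign sl[reverse]) by an index-then-lookup decomposition: one pass collects the ordered set of canonical keys via dict.fromkeys, then each bucket is built directly with two dict lookups in a comprehension.
import Mathlib
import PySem

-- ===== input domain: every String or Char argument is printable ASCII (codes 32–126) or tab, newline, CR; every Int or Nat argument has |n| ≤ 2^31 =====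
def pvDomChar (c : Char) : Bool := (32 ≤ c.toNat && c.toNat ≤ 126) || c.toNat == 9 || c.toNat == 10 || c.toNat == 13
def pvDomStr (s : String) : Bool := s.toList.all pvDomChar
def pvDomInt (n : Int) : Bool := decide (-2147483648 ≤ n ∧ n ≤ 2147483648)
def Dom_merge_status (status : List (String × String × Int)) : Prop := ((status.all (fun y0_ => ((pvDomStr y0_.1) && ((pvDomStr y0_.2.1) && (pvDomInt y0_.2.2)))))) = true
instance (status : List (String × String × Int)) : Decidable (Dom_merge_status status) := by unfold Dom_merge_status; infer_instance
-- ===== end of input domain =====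

-- B replaces A's one-pass scatter into mutable 2-slot lists by an index-then-lookup decomposition:
-- first the ordered set of canonical keys (dict.fromkeys), then each bucket built by two lookups.
-- Equivalence of the return value is proved for association lists without a repeated directed key.

-- ===== PORT A =====
-- one iteration of A's for-loop; sl[reverse] = value is List.set at index 0/1, always in range
-- for the 2-element slot list, hence exact; conn[0] > conn[1] is decide (conn.2 < conn.1)
def mergeStepA (new_status : PySem.Dict (String × String) (List (Option Int)))
    (item : String × String × Int) : PySem.Dict (String × String) (List (Option Int)) :=
  let conn : String × String := (item.1, item.2.1)
  let reverse : Bool := decide (conn.2 < conn.1)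
  let key : String × String := if reverse then (conn.2, conn.1) else conn
  let d := if new_status.contains key then new_status else new_status.insert key [none, none]
  let sl := d.getD key []
  d.insert key (sl.set (if reverse then 1 else 0) (some item.2.2))

def merge_status (status : List (String × String × Int)) : List (String × String × List (Option Int)) :=
  ((status.foldl mergeStepA PySem.Dict.empty).items).map (fun kv => (kv.1.1, kv.1.2, kv.2))

-- ===== PORT B =====
-- tuple(sorted(conn)) for a pair of strings
def canonPair (p : String × String) : String × String := if p.2 < p.1 then (p.2, p.1) else p

-- status.get(k): first-match lookup in the association list
def dirGet (status : List (String × String × Int)) (k : String × String) : Option Int :=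
  (status.find? (fun it => (it.1, it.2.1) == k)).map (fun it => it.2.2)

def merge_status_alt (status : List (String × String × Int)) : List (String × String × List (Option Int)) :=
  let keys := PySem.List.dedup (status.map (fun it => canonPair (it.1, it.2.1)))
  keys.map (fun k => (k.1, k.2,
    [dirGet status k, if k.1 == k.2 then none else dirGet status (k.2, k.1)]))

-- ===== PRECONDITION & SPEC =====
-- Pre_ excludes association lists with a repeated directed (src, dst) key: such a list is not the
-- image of any Python dict (A's declared input type), so A's last-write-wins overwrite and B's
-- first-match lookup are both accidental readings of it.
def Pre_merge_status (status : List (String × String × Int)) : Prop :=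
  (status.map (fun it => (it.1, it.2.1))).Nodup
instance (status : List (String × String × Int)) : Decidable (Pre_merge_status status) := by unfold Pre_merge_status; infer_instance

def pvWitness_merge_status : (List (String × String × Int)) :=
  [("a", "b", 1), ("b", "a", 2), ("c", "c", 3), ("b", "c", -4)]

def Spec_merge_status (status : List (String × String × Int)) (out : List (String × String × List (Option Int))) : Prop := out = merge_status_alt status
instance (status : List (String × String × Int)) (out : List (String × String × List (Option Int))) : Decidable (Spec_merge_status status out) := by unfold Spec_merge_status; infer_instance

-- ===== CLAIM (what is proved, stated in full; the proofs are below) =====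
def Claim_equal_merge_status : Prop := ∀ (status : List (String × String × Int)), Dom_merge_status status → Pre_merge_status status → Spec_merge_status status (merge_status status)

-- ===== LEMMAS AND PROOFS =====
def pvDirKeys (s : List (String × String × Int)) : List (String × String) :=
  s.map (fun it => (it.1, it.2.1))

def pvBucket (s : List (String × String × Int)) (k : String × String) : List (Option Int) :=
  [dirGet s k, if k.1 == k.2 then none else dirGet s (k.2, k.1)]

def pvItems (s : List (String × String × Int)) : List ((String × String) × List (Option Int)) :=
  (PySem.List.dedup (s.map (fun it => canonPair (it.1, it.2.1)))).map (fun k => (k, pvBucket s k))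

lemma canonPair_not_lt (p : String × String) : ¬ (canonPair p).2 < (canonPair p).1 := by
  unfold canonPair; split_ifs with h
  · exact fun h' => absurd h (lt_asymm h')
  · exact h

lemma canonPair_of_not_lt {p : String × String} (h : ¬ p.2 < p.1) : canonPair p = p := by
  unfold canonPair; exact if_neg h

lemma canonPair_swap {x y : String} (h : ¬ y < x) : canonPair (y, x) = (x, y) := by
  unfold canonPair
  rcases lt_or_ge x y with h1 | h1
  · simp [h1]
  · have hxy : x = y := le_antisymm (not_lt.mp h) h1
    subst hxy
    simp

lemma canonPair_eq_diag {p : String × String} {x : String} (h : canonPair p = (x, x)) :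
    p = (x, x) := by
  unfold canonPair at h; split_ifs at h
  · exact Prod.ext (congrArg Prod.snd h) (congrArg Prod.fst h)
  · exact h

lemma dirGet_cons (x : String × String × Int) (t : List (String × String × Int))
    (k : String × String) :
    dirGet (x :: t) k = if (x.1, x.2.1) = k then some x.2.2 else dirGet t k := by
  simp only [dirGet, List.find?_cons]
  split_ifs with hx
  · simp [hx]
  · simp [beq_eq_false_iff_ne.mpr hx]

lemma dirGet_eq_none_iff (s : List (String × String × Int)) (k : String × String) :
    dirGet s k = none ↔ k ∉ pvDirKeys s := by
  induction s with
  | nil => simp [dirGet, pvDirKeys]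
  | cons x t ih =>
    rw [dirGet_cons]
    by_cases hx : (x.1, x.2.1) = k
    · simp [pvDirKeys, hx]
    · simp only [pvDirKeys, List.map_cons, List.mem_cons, if_neg hx]
      rw [ih]
      simp only [pvDirKeys]
      constructor
      · rintro hn (h1 | h2)
        · exact hx h1.symm
        · exact hn h2
      · intro hn h2
        exact hn (Or.inr h2)

lemma dirGet_append_of_ne (s : List (String × String × Int)) (e : String × String × Int)
    (k : String × String) (h : (e.1, e.2.1) ≠ k) : dirGet (s ++ [e]) k = dirGet s k := by
  have hb : ((e.1, e.2.1) == k) = false := beq_eq_false_iff_ne.mpr h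
  simp only [dirGet, List.find?_append]
  have : List.find? (fun it => (it.1, it.2.1) == k) [e] = none := by
    simp [List.find?, hb]
  rw [this]
  cases s.find? (fun it => (it.1, it.2.1) == k) <;> simp

lemma dirGet_append_self (s : List (String × String × Int)) (e : String × String × Int)
    (h : (e.1, e.2.1) ∉ pvDirKeys s) : dirGet (s ++ [e]) (e.1, e.2.1) = some e.2.2 := by
  have hf : s.find? (fun it => (it.1, it.2.1) == (e.1, e.2.1)) = none := by
    rw [List.find?_eq_none]
    intro x hx
    simp only [beq_iff_eq]
    intro hk
    exact h (hk ▸ (List.mem_map_of_mem hx : (x.1, x.2.1) ∈ pvDirKeys s))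
  simp only [dirGet, List.find?_append, hf, Option.none_or]
  simp [List.find?]

lemma pvDedup_append_singleton {α : Type} [BEq α] [LawfulBEq α] (l : List α) (x : α) :
    PySem.List.dedup (l ++ [x]) =
      if x ∈ l then PySem.List.dedup l else PySem.List.dedup l ++ [x] := by
  simp only [PySem.List.dedup_eq_ofList]
  rw [PySem.Set.ofList_append]
  simp [PySem.Set.update, PySem.Set.add, PySem.Set.mem_ofList]

lemma pvMem_canon {s : List (String × String × Int)} {q : String × String}
    (h : q ∈ pvDirKeys s) : canonPair q ∈ s.map (fun it => canonPair (it.1, it.2.1)) := by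
  have hmap : s.map (fun it => canonPair (it.1, it.2.1)) = (pvDirKeys s).map canonPair := by
    simp [pvDirKeys, List.map_map]
  rw [hmap]
  exact List.mem_map_of_mem h

lemma pvMem_map_canon_not_lt {s : List (String × String × Int)} {k' : String × String}
    (h : k' ∈ s.map (fun it => canonPair (it.1, it.2.1))) : ¬ k'.2 < k'.1 := by
  obtain ⟨it, _, rfl⟩ := List.mem_map.mp h
  exact canonPair_not_lt _

lemma pvNe_keys {a b : String} {k' : String × String}
    (hcanon : ¬ k'.2 < k'.1) (hne : k' ≠ canonPair (a, b)) :
    (a, b) ≠ k' ∧ (a, b) ≠ (k'.2, k'.1) := by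
  constructor
  · rintro rfl
    exact hne (canonPair_of_not_lt hcanon).symm
  · intro hq
    apply hne
    rw [show ((a, b) : String × String) = (k'.2, k'.1) from hq]
    exact (canonPair_swap hcanon).symm

lemma pvBucket_append_of_ne (s : List (String × String × Int)) (e : String × String × Int)
    (k : String × String) (h1 : (e.1, e.2.1) ≠ k) (h2 : (e.1, e.2.1) ≠ (k.2, k.1)) :
    pvBucket (s ++ [e]) k = pvBucket s k := by
  unfold pvBucket
  rw [dirGet_append_of_ne s e k h1, dirGet_append_of_ne s e (k.2, k.1) h2]

lemma mergeStepA_lt (d : PySem.Dict (String × String) (List (Option Int)))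
    {a b : String} (v : Int) (hr : b < a) :
    mergeStepA d (a, b, v) =
      (if d.contains (b, a) then d else d.insert (b, a) [none, none]).insert (b, a)
        (((if d.contains (b, a) then d else d.insert (b, a) [none, none]).getD (b, a) []).set 1 (some v)) := by
  simp [mergeStepA, hr]

lemma mergeStepA_ge (d : PySem.Dict (String × String) (List (Option Int)))
    {a b : String} (v : Int) (hr : ¬ b < a) :
    mergeStepA d (a, b, v) =
      (if d.contains (a, b) then d else d.insert (a, b) [none, none]).insert (a, b)
        (((if d.contains (a, b) then d else d.insert (a, b) [none, none]).getD (a, b) []).set 0 (some v)) := by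
  simp [mergeStepA, hr]

-- buckets of the new element's canonical key over the extended list
lemma pvBucket_append_key_ge {s : List (String × String × Int)} {a b : String} (v : Int)
    (_hr : ¬ b < a) (hab : a ≠ b) (hnotin : ((a, b) : String × String) ∉ pvDirKeys s) :
    pvBucket (s ++ [(a, b, v)]) (a, b) = [some v, dirGet s (b, a)] := by
  unfold pvBucket
  have h1 : dirGet (s ++ [(a, b, v)]) (a, b) = some v := dirGet_append_self s (a, b, v) hnotin
  have h2 : dirGet (s ++ [(a, b, v)]) (b, a) = dirGet s (b, a) := by
    apply dirGet_append_of_ne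
    simp [Prod.ext_iff]
    intro h; exact absurd h hab
  simp [h1, h2, hab]

lemma pvBucket_append_key_diag {s : List (String × String × Int)} {a : String} (v : Int)
    (hnotin : ((a, a) : String × String) ∉ pvDirKeys s) :
    pvBucket (s ++ [(a, a, v)]) (a, a) = [some v, none] := by
  unfold pvBucket
  have h1 : dirGet (s ++ [(a, a, v)]) (a, a) = some v := dirGet_append_self s (a, a, v) hnotin
  simp [h1]

lemma pvBucket_append_key_lt {s : List (String × String × Int)} {a b : String} (v : Int)
    (hr : b < a) (hnotin : ((a, b) : String × String) ∉ pvDirKeys s) :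
    pvBucket (s ++ [(a, b, v)]) (b, a) = [dirGet s (b, a), some v] := by
  have hab : b ≠ a := ne_of_lt hr
  unfold pvBucket
  have h1 : dirGet (s ++ [(a, b, v)]) (b, a) = dirGet s (b, a) := by
    apply dirGet_append_of_ne
    simp [Prod.ext_iff]
    intro h; exact absurd h.symm hab
  have h2 : dirGet (s ++ [(a, b, v)]) (a, b) = some v := dirGet_append_self s (a, b, v) hnotin
  simp [h1, h2, hab]

lemma pvStep (s : List (String × String × Int)) (e : String × String × Int)
    (h : (pvDirKeys (s ++ [e])).Nodup)
    (d : PySem.Dict (String × String) (List (Option Int)))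
    (ih : d.items = pvItems s) :
    (mergeStepA d e).items = pvItems (s ++ [e]) := by
  obtain ⟨a, b, v⟩ := e
  have hsplit : pvDirKeys (s ++ [(a, b, v)]) = pvDirKeys s ++ [(a, b)] := by simp [pvDirKeys]
  rw [hsplit] at h
  have hnd0 : (pvDirKeys s).Nodup := h.sublist (List.sublist_append_left _ _)
  have hnotin : ((a, b) : String × String) ∉ pvDirKeys s := by
    intro hm
    exact List.disjoint_of_nodup_append h hm (by simp)
  have hkeys : d.keys = PySem.List.dedup (s.map (fun it => canonPair (it.1, it.2.1))) := by
    simp only [PySem.Dict.keys, ih, pvItems, List.map_map]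
    have hid : ((fun (x : (String × String) × List (Option Int)) => x.1) ∘
        fun k => (k, pvBucket s k)) = id := rfl
    rw [hid, List.map_id]
  have hndk : d.keys.Nodup := by rw [hkeys]; exact PySem.List.nodup_dedup _
  have hKnew : PySem.List.dedup ((s ++ [(a, b, v)]).map (fun it => canonPair (it.1, it.2.1))) =
      if canonPair (a, b) ∈ s.map (fun it => canonPair (it.1, it.2.1))
      then PySem.List.dedup (s.map (fun it => canonPair (it.1, it.2.1)))
      else PySem.List.dedup (s.map (fun it => canonPair (it.1, it.2.1))) ++ [canonPair (a, b)] := by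
    rw [List.map_append]
    simp only [List.map_cons, List.map_nil]
    exact pvDedup_append_singleton _ _
  by_cases hc : canonPair (a, b) ∈ s.map (fun it => canonPair (it.1, it.2.1))
  · -- key already present in the dict
    have hcont : d.contains (canonPair (a, b)) = true :=
      (PySem.Dict.contains_iff_mem_keys d _).mpr
        (by rw [hkeys]; exact (PySem.List.mem_dedup _ _).mpr hc)
    have hmem_item : (canonPair (a, b), pvBucket s (canonPair (a, b))) ∈ d.items := by
      rw [ih]
      exact List.mem_map_of_mem ((PySem.List.mem_dedup _ _).mpr hc)
    have hgetD : d.getD (canonPair (a, b)) [] = pvBucket s (canonPair (a, b)) :=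
      PySem.Dict.getD_of_mem_items d hmem_item hndk []
    have main : ∀ idx : Nat, (d.insert (canonPair (a, b))
          ((pvBucket s (canonPair (a, b))).set idx (some v))).items =
        (PySem.List.dedup (s.map (fun it => canonPair (it.1, it.2.1)))).map
          (fun k => (k, if k = canonPair (a, b)
            then (pvBucket s (canonPair (a, b))).set idx (some v) else pvBucket s k)) := by
      intro idx
      rw [PySem.Dict.items_insert_of_contains d _ hcont, ih]
      unfold pvItems
      rw [List.map_map]
      apply List.map_congr_left
      intro k' _
      by_cases hk' : k' = canonPair (a, b) <;> simp [hk']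
    by_cases hr : b < a
    · -- reverse: key = (b, a), slot 1
      have hkey : canonPair (a, b) = (b, a) := by simp [canonPair, hr]
      have hab : b ≠ a := ne_of_lt hr
      rw [mergeStepA_lt d v hr, if_pos (hkey ▸ hcont)]
      rw [show ((b, a) : String × String) = canonPair (a, b) from hkey.symm, hgetD]
      rw [main 1, pvItems, hKnew, if_pos hc]
      apply List.map_congr_left
      intro k' hk'
      by_cases hkk : k' = canonPair (a, b)
      · subst hkk
        rw [if_pos rfl, hkey]
        have hbs : pvBucket s (b, a) = [dirGet s (b, a), dirGet s (a, b)] := by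
          simp [pvBucket, hab]
        have hget0 : dirGet s (a, b) = none := (dirGet_eq_none_iff s _).mpr hnotin
        rw [pvBucket_append_key_lt v hr hnotin, hbs, hget0]
        rfl
      · rw [if_neg hkk]
        have hcanon : ¬ k'.2 < k'.1 :=
          pvMem_map_canon_not_lt ((PySem.List.mem_dedup _ _).mp hk')
        obtain ⟨h1, h2⟩ := pvNe_keys hcanon hkk
        rw [pvBucket_append_of_ne s (a, b, v) k' h1 h2]
    · -- forward: key = (a, b), slot 0; a = b impossible since (a,b) would already be a directed key
      have hkey : canonPair (a, b) = (a, b) := by simp [canonPair, hr]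
      have hab : a ≠ b := by
        intro hEq
        subst hEq
        have hca : ((a, a) : String × String) ∈ s.map (fun it => canonPair (it.1, it.2.1)) := by
          rw [← hkey]; exact hc
        obtain ⟨it, hit, hcp⟩ := List.mem_map.mp hca
        have hdg : ((it.1, it.2.1) : String × String) = (a, a) := canonPair_eq_diag hcp
        have hmm : ((it.1, it.2.1) : String × String) ∈ pvDirKeys s :=
          List.mem_map_of_mem hit
        rw [hdg] at hmm
        exact hnotin hmm
      rw [mergeStepA_ge d v hr, if_pos (hkey ▸ hcont)]
      rw [show ((a, b) : String × String) = canonPair (a, b) from hkey.symm, hgetD]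
      rw [main 0, pvItems, hKnew, if_pos hc]
      apply List.map_congr_left
      intro k' hk'
      by_cases hkk : k' = canonPair (a, b)
      · subst hkk
        rw [if_pos rfl, hkey]
        have hbs : pvBucket s (a, b) = [dirGet s (a, b), dirGet s (b, a)] := by
          simp [pvBucket, hab]
        have hget0 : dirGet s (a, b) = none := (dirGet_eq_none_iff s _).mpr hnotin
        rw [pvBucket_append_key_ge v hr hab hnotin, hbs, hget0]
        rfl
      · rw [if_neg hkk]
        have hcanon : ¬ k'.2 < k'.1 :=
          pvMem_map_canon_not_lt ((PySem.List.mem_dedup _ _).mp hk')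
        obtain ⟨h1, h2⟩ := pvNe_keys hcanon hkk
        rw [pvBucket_append_of_ne s (a, b, v) k' h1 h2]
  · -- fresh key: appended at the end
    have hcont : d.contains (canonPair (a, b)) = false := by
      cases hx : d.contains (canonPair (a, b)) with
      | false => rfl
      | true =>
          have hmk : canonPair (a, b) ∈ d.keys :=
            (PySem.Dict.contains_iff_mem_keys d _).mp hx
          rw [hkeys] at hmk
          exact absurd ((PySem.List.mem_dedup _ _).mp hmk) hc
    have hold : ∀ k', k' ∈ PySem.List.dedup (s.map (fun it => canonPair (it.1, it.2.1))) →
        pvBucket (s ++ [(a, b, v)]) k' = pvBucket s k' := by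
      intro k' hk'
      have hkk : k' ≠ canonPair (a, b) := by
        intro hEq
        exact hc (hEq ▸ (PySem.List.mem_dedup _ _).mp hk')
      have hcanon : ¬ k'.2 < k'.1 :=
        pvMem_map_canon_not_lt ((PySem.List.mem_dedup _ _).mp hk')
      obtain ⟨h1, h2⟩ := pvNe_keys hcanon hkk
      exact pvBucket_append_of_ne s (a, b, v) k' h1 h2
    have hfinal : ∀ w, (d.insert (canonPair (a, b)) w).items =
        pvItems s ++ [(canonPair (a, b), w)] := by
      intro w
      rw [PySem.Dict.items_insert_of_not_contains d w hcont, ih]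
    have hitems : ∀ w, (mergeStepA d (a, b, v) = d.insert (canonPair (a, b)) w) →
        (mergeStepA d (a, b, v)).items = pvItems s ++ [(canonPair (a, b), w)] := by
      intro w hw
      rw [hw]; exact hfinal w
    have hmain : ∀ w, pvBucket (s ++ [(a, b, v)]) (canonPair (a, b)) = w →
        pvItems s ++ [(canonPair (a, b), w)] = pvItems (s ++ [(a, b, v)]) := by
      intro w hw
      unfold pvItems
      rw [hKnew, if_neg hc, List.map_append]
      congr 1
      · apply List.map_congr_left
        intro k' hk'
        rw [hold k' hk']
      · simp [hw]
    by_cases hr : b < a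
    · have hkey : canonPair (a, b) = (b, a) := by simp [canonPair, hr]
      have hrev_notin : ((b, a) : String × String) ∉ pvDirKeys s := by
        intro hm
        have := pvMem_canon hm
        have hcp : canonPair (b, a) = (b, a) := canonPair_of_not_lt (by exact lt_asymm hr)
        exact hc (by rw [hkey]; exact hcp ▸ this)
      have hget : dirGet s (b, a) = none := (dirGet_eq_none_iff s _).mpr hrev_notin
      have hstep : mergeStepA d (a, b, v) =
          d.insert (canonPair (a, b)) ([none, none].set 1 (some v)) := by
        have hcfalse : ¬ (d.contains ((b, a) : String × String) = true) := by
          rw [← hkey]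
          simp [hcont]
        rw [mergeStepA_lt d v hr, if_neg hcfalse]
        rw [PySem.Dict.insert_insert_self, PySem.Dict.getD_insert_self, hkey]
      rw [hitems _ hstep]
      apply hmain
      rw [hkey, pvBucket_append_key_lt v hr hnotin, hget]
      rfl
    · have hkey : canonPair (a, b) = (a, b) := by simp [canonPair, hr]
      have hstep : mergeStepA d (a, b, v) =
          d.insert (canonPair (a, b)) ([none, none].set 0 (some v)) := by
        have hcfalse : ¬ (d.contains ((a, b) : String × String) = true) := by
          rw [← hkey]
          simp [hcont]
        rw [mergeStepA_ge d v hr, if_neg hcfalse]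
        rw [PySem.Dict.insert_insert_self, PySem.Dict.getD_insert_self, hkey]
      rw [hitems _ hstep]
      apply hmain
      by_cases hab : a = b
      · subst hab
        rw [hkey, pvBucket_append_key_diag v hnotin]
        rfl
      · have hrev_notin : ((b, a) : String × String) ∉ pvDirKeys s := by
          intro hm
          have := pvMem_canon hm
          have hcp : canonPair (b, a) = (a, b) := canonPair_swap hr
          exact hc (by rw [hkey]; exact hcp ▸ this)
        have hget : dirGet s (b, a) = none := (dirGet_eq_none_iff s _).mpr hrev_notin
        rw [hkey, pvBucket_append_key_ge v hr hab hnotin, hget]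
        rfl
lemma pvFoldl_items (s : List (String × String × Int)) (h : (pvDirKeys s).Nodup) :
    (s.foldl mergeStepA PySem.Dict.empty).items = pvItems s := by
  induction s using List.reverseRecOn with
  | nil => simp [pvItems, PySem.List.dedup]; rfl
  | append_singleton s e ih =>
      have hs : (pvDirKeys s).Nodup := by
        have hsp : pvDirKeys (s ++ [e]) = pvDirKeys s ++ [(e.1, e.2.1)] := by simp [pvDirKeys]
        rw [hsp] at h
        exact h.sublist (List.sublist_append_left _ _)
      rw [List.foldl_append]
      exact pvStep s e h _ (ih hs)

-- ===== VERDICT (by name: the statement is the Claim_ definition above) =====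
theorem merge_status_spec : Claim_equal_merge_status := by
  intro status _ hpre
  unfold Spec_merge_status merge_status merge_status_alt
  rw [pvFoldl_items status hpre]
  simp [pvItems, pvBucket, List.map_map]
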